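-- pv_equiv track=rewrite | github.com/MayneKeen/db-labs | course_work/db_interface.py | format_products_price
-- ===== SOURCE A (Python) =====
-- def format_products_price(products):
--     products_str = ""
--     i = 0
--     for prod in products:
--         if i == 0:
--             products_str += "name: "
--             products_str += str(prod)
--             products_str += ' '
--             i += 1
--             continue
--         elif i == 1:
--             products_str += "price: "
--             products_str += str(prod)
--             products_str += ' '
--             i += 1
--             continue
--         elif i == 2:
--             products_str += "type: "
--             products_str += str(prod)
--             products_str += '\n'
--             i = 0
--             continue
--     return products_str
-- ===== SOURCE B (Python) =====
-- def format_products_price(products):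
--     lst = list(products)
--     if not lst:
--         return ""
--     labels = ("name: ", "price: ", "type: ")
--     seps = (" ", " ", "\n")
--     part = "".join(l + str(p) + s for l, p, s in zip(labels, lst[:3], seps))
--     return part + format_products_price(lst[3:])
-- ===== Notes on version B (the rewrite author's own statement) =====
-- stated objective: alternative
-- what changed: Replaces A's flat loop with a mutable 0/1/2 counter by recursion over 3-element chunks, zipping each chunk against parallel label/separator tables; clearer decomposition but slice copies make it quadratic on very large lists.
import Mathlib
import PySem

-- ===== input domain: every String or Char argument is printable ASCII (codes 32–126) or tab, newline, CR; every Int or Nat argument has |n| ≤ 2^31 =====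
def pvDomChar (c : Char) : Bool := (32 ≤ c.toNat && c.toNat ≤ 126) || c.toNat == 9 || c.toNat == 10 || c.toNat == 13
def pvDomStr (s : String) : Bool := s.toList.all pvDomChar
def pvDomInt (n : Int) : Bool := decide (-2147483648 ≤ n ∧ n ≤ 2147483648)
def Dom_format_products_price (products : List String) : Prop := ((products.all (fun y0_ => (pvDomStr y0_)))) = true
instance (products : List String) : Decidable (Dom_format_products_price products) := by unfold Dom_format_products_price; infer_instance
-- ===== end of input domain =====

-- B replaces A's flat counter-driven loop by recursion over 3-element chunks zipped
-- against parallel label/separator tables; same output (objective: alternative decomposition).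


-- ===== PORT A =====
-- flat loop: accumulator string plus a counter i cycling 0 → 1 → 2 → 0;
-- string concatenation is kept on the character-list side (String.append is kernel-opaque)
def format_products_price (products : List String) : String :=
  String.ofList
    (products.foldl
      (fun (st : List Char × Int) prod =>
        if st.2 == 0 then (st.1 ++ "name: ".toList ++ prod.toList ++ [' '], st.2 + 1)
        else if st.2 == 1 then (st.1 ++ "price: ".toList ++ prod.toList ++ [' '], st.2 + 1)
        else if st.2 == 2 then (st.1 ++ "type: ".toList ++ prod.toList ++ ['\n'], 0)
        else st)
      ([], 0)).1

-- ===== PORT B =====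
-- recursion over 3-element chunks: zip the chunk against the label and separator tables;
-- lst[:3] and lst[3:] are PySem.List.slice, "".join is PySem.Chars.join [] (char-list side)
def pvAltGo (lst : List (List Char)) : List Char :=
  if h : lst = [] then []
  else
    let part := PySem.Chars.join []
      (((["name: ".toList, "price: ".toList, "type: ".toList].zip
          (PySem.List.slice lst none (some 3))).zip
        [[' '], [' '], ['\n']]).map (fun t => t.1.1 ++ t.1.2 ++ t.2))
    part ++ pvAltGo (PySem.List.slice lst (some 3) none)
termination_by lst.length
decreasing_by
  simp only [show ((3:Int) = ((3:Nat):Int)) from rfl, PySem.List.slice_from_natCast,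
    List.length_drop]
  have : lst.length ≠ 0 := fun hl => h (List.eq_nil_of_length_eq_zero hl)
  omega

def format_products_price_alt (products : List String) : String :=
  String.ofList (pvAltGo (products.map String.toList))

-- ===== PRECONDITION & SPEC =====
def Spec_format_products_price (products : List String) (out : String) : Prop := out = format_products_price_alt products
instance (products : List String) (out : String) : Decidable (Spec_format_products_price products out) := by unfold Spec_format_products_price; infer_instance

-- ===== CLAIM (what is proved, stated in full; the proofs are below) =====
def Claim_equal_format_products_price : Prop := ∀ (products : List String), Dom_format_products_price products → Spec_format_products_price products (format_products_price products)

-- ===== LEMMAS AND PROOFS =====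

-- chunk-evaluation lemmas for B's recursion
theorem pvAltGo_nil : pvAltGo [] = [] := by
  rw [pvAltGo.eq_def, dif_pos rfl]

theorem pvAltGo_one (a : List Char) :
    pvAltGo [a] = "name: ".toList ++ a ++ [' '] := by
  rw [pvAltGo.eq_def, dif_neg (List.cons_ne_nil _ _)]
  rw [show ((3:Int) = ((3:Nat):Int)) from rfl, PySem.List.slice_to_natCast,
    PySem.List.slice_from_natCast]
  simp [pvAltGo_nil, PySem.Chars.join_singleton]

theorem pvAltGo_two (a b : List Char) : pvAltGo [a, b] =
    "name: ".toList ++ a ++ [' '] ++ "price: ".toList ++ b ++ [' '] := by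
  rw [pvAltGo.eq_def, dif_neg (List.cons_ne_nil _ _)]
  rw [show ((3:Int) = ((3:Nat):Int)) from rfl, PySem.List.slice_to_natCast,
    PySem.List.slice_from_natCast]
  simp [pvAltGo_nil, PySem.Chars.join_cons_cons, PySem.Chars.join_singleton]

theorem pvAltGo_chunk (a b c : List Char) (rest : List (List Char)) :
    pvAltGo (a :: b :: c :: rest) =
      "name: ".toList ++ a ++ [' '] ++ "price: ".toList ++ b ++ [' ']
        ++ "type: ".toList ++ c ++ ['\n'] ++ pvAltGo rest := by
  rw [pvAltGo.eq_def, dif_neg (List.cons_ne_nil _ _)]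
  rw [show ((3:Int) = ((3:Nat):Int)) from rfl, PySem.List.slice_to_natCast,
    PySem.List.slice_from_natCast]
  simp [PySem.Chars.join_cons_cons, PySem.Chars.join_singleton]

-- the generalized invariant: folding A's step from accumulator (s, 0) appends B's result to s
theorem pvFold_eq_alt : ∀ (l : List String) (s : List Char),
    (l.foldl
      (fun (st : List Char × Int) prod =>
        if st.2 == 0 then (st.1 ++ "name: ".toList ++ prod.toList ++ [' '], st.2 + 1)
        else if st.2 == 1 then (st.1 ++ "price: ".toList ++ prod.toList ++ [' '], st.2 + 1)
        else if st.2 == 2 then (st.1 ++ "type: ".toList ++ prod.toList ++ ['\n'], 0)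
        else st)
      (s, 0)).1 = s ++ pvAltGo (l.map String.toList)
  | [], s => by
    simp [pvAltGo_nil]
  | [a], s => by
    simp [pvAltGo_one]
  | [a, b], s => by
    simp [pvAltGo_two]
  | a :: b :: c :: rest, s => by
    have ih := pvFold_eq_alt rest
      (s ++ "name: ".toList ++ a.toList ++ [' '] ++ "price: ".toList ++ b.toList ++ [' ']
        ++ "type: ".toList ++ c.toList ++ ['\n'])
    simp only [List.foldl_cons] at ih ⊢
    norm_num at ih ⊢
    rw [ih]
    simp [pvAltGo_chunk]
termination_by l => l.length

-- ===== VERDICT (by name: the statement is the Claim_ definition above) =====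
theorem format_products_price_spec : Claim_equal_format_products_price := by
  intro products _
  unfold Spec_format_products_price format_products_price format_products_price_alt
  rw [pvFold_eq_alt products []]
  rfl
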